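-- pv_equiv track=rewrite | github.com/TEESlab-UPRC/DREEM | auxiliary.py | discresult
-- ===== SOURCE A (Python) =====
-- def discresult(numhours, hr, values):
--     var = [0 for k in range(numhours)]
--     j = 0
--     for i in range(len(hr)-1):
--         if hr[i] != hr[i+1]:
--             var[j] = values[i]
--             j += 1
--     return var
-- ===== SOURCE B (Python) =====
-- def discresult(numhours, hr, values):
--     # Run-skipping traversal: advance run by run through hr; each maximal run
--     # that is followed by a different value contributes values[run_end].
--     out = [0] * numhours
--     n = len(hr)
--     i = 0  # start of the current run
--     j = 0
--     while i < n:
--         r = i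
--         while r + 1 < n and hr[r + 1] == hr[r]:
--             r += 1
--         if r + 1 < n:          # a change follows this run
--             out[j] = values[r]
--             j += 1
--         i = r + 1
--     return out
-- ===== Notes on version B (the rewrite author's own statement) =====
-- stated objective: alternative
-- what changed: B traverses hr run by run: a nested while skips each maximal run of equal values, and at each run boundary it writes values[run_end] into the pre-zeroed output, instead of A's uniform index-by-index adjacent-pair scan.
import Mathlib
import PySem

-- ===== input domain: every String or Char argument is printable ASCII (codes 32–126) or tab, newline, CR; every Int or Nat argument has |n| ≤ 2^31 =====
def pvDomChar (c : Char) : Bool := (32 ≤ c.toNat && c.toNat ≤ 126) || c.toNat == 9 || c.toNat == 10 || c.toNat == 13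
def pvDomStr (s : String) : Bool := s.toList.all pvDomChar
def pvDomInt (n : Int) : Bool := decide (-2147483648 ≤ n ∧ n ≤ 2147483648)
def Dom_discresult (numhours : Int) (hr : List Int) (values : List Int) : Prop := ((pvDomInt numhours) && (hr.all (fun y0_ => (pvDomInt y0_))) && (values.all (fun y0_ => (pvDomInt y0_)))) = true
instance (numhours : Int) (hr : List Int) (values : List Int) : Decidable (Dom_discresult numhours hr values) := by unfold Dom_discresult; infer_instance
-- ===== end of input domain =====

-- B replaces A's index-by-index adjacent-pair scan with a run-skipping traversal:
-- a nested while skips each maximal run of equal hr values and writes values[run_end]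
-- at each run boundary (objective: alternative decomposition, same cost).

-- ===== PORT A =====
-- loop body: 'if hr[i] != hr[i+1]: var[j] = values[i]; j += 1' (values[i]/var[j]
-- are total pyGetD/pySetD forms; Pre_ keeps the indices in range exactly where Python returns)
def discresultStep (hr values : List Int) (st : List Int × Int) (i : Int) : List Int × Int :=
  if PySem.List.pyGet? hr i ≠ PySem.List.pyGet? hr (i + 1) then
    (PySem.List.pySetD st.1 st.2 (PySem.List.pyGetD values i 0), st.2 + 1)
  else st

def discresult (numhours : Int) (hr : List Int) (values : List Int) : List Int :=
  ((PySem.List.pyRange 0 ((hr.length : Int) - 1) 1).foldl (discresultStep hr values)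
    (List.replicate numhours.toNat 0, 0)).1

-- ===== PORT B =====
-- inner while: 'while r + 1 < n and hr[r + 1] == hr[r]: r += 1'
-- (both accesses are guarded in range, so getD is exact here; the fuel argument
-- only makes the loop total — hr.length steps always suffice)
def runEnd (hr : List Int) : Nat → Nat → Nat
  | 0, r => r
  | fuel + 1, r =>
    if r + 1 < hr.length ∧ hr.getD (r + 1) 0 = hr.getD r 0 then
      runEnd hr fuel (r + 1)
    else r

-- outer while: 'while i < n: r = <run end>; if r + 1 < n: out[j] = values[r]; j += 1; i = r + 1'
-- (out[j] is the total pySetD form; values[r] is in range inside Pre_, getD is exact there;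
-- the fuel argument only makes the loop total — hr.length + 1 iterations always suffice)
def discOuter (hr values : List Int) : Nat → Nat → List Int → Int → List Int
  | 0, _, out, _ => out
  | fuel + 1, i, out, j =>
    if i < hr.length then
      let r := runEnd hr hr.length i
      if r + 1 < hr.length then
        discOuter hr values fuel (r + 1) (PySem.List.pySetD out j (values.getD r 0)) (j + 1)
      else
        discOuter hr values fuel (r + 1) out j
    else out

def discresult_alt (numhours : Int) (hr : List Int) (values : List Int) : List Int :=
  discOuter hr values (hr.length + 1) 0 (List.replicate numhours.toNat 0) 0

-- ===== PRECONDITION & SPEC =====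
-- the change-point indices of hr, stated directly on the input (no re-simulation)
def pvChangeIdxs (hr : List Int) : List Nat :=
  (List.range (hr.length - 1)).filter (fun i => hr.getD i 0 ≠ hr.getD (i + 1) 0)

-- Pre_ excludes exactly the inputs where Python A raises IndexError: more change
-- points than slots in the zero buffer, or a change point i with i ≥ len(values).
def Pre_discresult (numhours : Int) (hr : List Int) (values : List Int) : Prop :=
  (pvChangeIdxs hr).length ≤ numhours.toNat ∧ ∀ i ∈ pvChangeIdxs hr, i < values.length
instance (numhours : Int) (hr : List Int) (values : List Int) : Decidable (Pre_discresult numhours hr values) := by unfold Pre_discresult; infer_instance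

def pvWitness_discresult : Int × List Int × List Int := (4, [1, 1, 2, 3, 3], [10, 20, 30, 40, 50])

def Spec_discresult (numhours : Int) (hr : List Int) (values : List Int) (out : List Int) : Prop := out = discresult_alt numhours hr values
instance (numhours : Int) (hr : List Int) (values : List Int) (out : List Int) : Decidable (Spec_discresult numhours hr values out) := by unfold Spec_discresult; infer_instance

-- ===== CLAIM (what is proved, stated in full; the proofs are below) =====
def Claim_equal_discresult : Prop := ∀ (numhours : Int) (hr : List Int) (values : List Int), Dom_discresult numhours hr values → Pre_discresult numhours hr values → Spec_discresult numhours hr values (discresult numhours hr values)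

-- ===== LEMMAS AND PROOFS =====

-- A's loop body on Nat indices (the common shape both proofs reduce to)
def stepN (hr values : List Int) (st : List Int × Int) (i : Nat) : List Int × Int :=
  if hr.getD i 0 ≠ hr.getD (i + 1) 0 then
    (PySem.List.pySetD st.1 st.2 (values.getD i 0), st.2 + 1)
  else st

-- A's Int-indexed step agrees with stepN on in-range indices
theorem step_cast (hr values : List Int) (st : List Int × Int) (k : Nat)
    (hk : k < hr.length - 1) :
    discresultStep hr values st (k : Int) = stepN hr values st k := by
  have hk1 : k < hr.length := by omega
  have hk2 : k + 1 < hr.length := by omega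
  have h1 : PySem.List.pyGet? hr (k : Int) = some hr[k] := by
    rw [PySem.List.pyGet?_natCast, List.getElem?_eq_getElem hk1]
  have h2 : PySem.List.pyGet? hr ((k : Int) + 1) = some hr[k + 1] := by
    rw [show ((k : Int) + 1) = (((k + 1 : Nat)) : Int) by push_cast; ring,
      PySem.List.pyGet?_natCast, List.getElem?_eq_getElem hk2]
  unfold discresultStep stepN
  rw [h1, h2, PySem.List.pyGetD_natCast]
  by_cases hc : hr[k] = hr[k + 1] <;>
    simp [hc, List.getD, List.getElem?_eq_getElem hk1, List.getElem?_eq_getElem hk2]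

-- folding stepN over indices inside a constant run does nothing
theorem foldl_stepN_id (hr values : List Int) :
    ∀ (L : List Nat) (st : List Int × Int),
      (∀ k ∈ L, hr.getD (k + 1) 0 = hr.getD k 0) →
      L.foldl (stepN hr values) st = st := by
  intro L
  induction L with
  | nil => intro st _; rfl
  | cons k L ih =>
    intro st h
    have hk := h k List.mem_cons_self
    rw [List.foldl_cons]
    have hid : stepN hr values st k = st := by
      unfold stepN; rw [if_neg (fun hne => hne hk.symm)]
    rw [hid]
    exact ih st (fun x hx => h x (List.mem_cons_of_mem _ hx))

-- r never decreases under runEnd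
theorem runEnd_ge (hr : List Int) :
    ∀ (fuel r : Nat), r ≤ runEnd hr fuel r := by
  intro fuel
  induction fuel with
  | zero => intro r; exact le_refl r
  | succ fuel ih =>
    intro r
    rw [runEnd]
    split
    · have := ih (r + 1); omega
    · exact le_refl r

-- with enough fuel, runEnd's exit condition fails at the result, and every index
-- strictly inside the run keeps the value constant
theorem runEnd_props (hr : List Int) :
    ∀ (fuel r : Nat), hr.length ≤ fuel + r + 1 →
      (¬ (runEnd hr fuel r + 1 < hr.length ∧
          hr.getD (runEnd hr fuel r + 1) 0 = hr.getD (runEnd hr fuel r) 0))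
      ∧ (∀ k, r ≤ k → k < runEnd hr fuel r → hr.getD (k + 1) 0 = hr.getD k 0) := by
  intro fuel
  induction fuel with
  | zero =>
    intro r hfuel
    rw [runEnd]
    exact ⟨fun h => by omega, fun k hk1 hk2 => absurd hk2 (by omega)⟩
  | succ fuel ih =>
    intro r hfuel
    rw [runEnd]
    split
    · rename_i h
      obtain ⟨hstop, hconst⟩ := ih (r + 1) (by omega)
      refine ⟨hstop, ?_⟩
      intro k hik hk
      rcases Nat.eq_or_lt_of_le hik with rfl | hlt
      · exact h.2
      · exact hconst k hlt hk
    · rename_i h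
      exact ⟨h, fun k hik hk => absurd hk (by omega)⟩

-- B's outer loop from run start i equals A's fold over the remaining pair indices
theorem discOuter_eq_fold (hr values : List Int) :
    ∀ (fuel i : Nat), hr.length - i ≤ fuel → ∀ (out : List Int) (j : Int),
      discOuter hr values fuel i out j
        = ((List.range' i (hr.length - 1 - i)).foldl (stepN hr values) (out, j)).1 := by
  intro fuel
  induction fuel with
  | zero =>
    intro i hN out j
    rw [discOuter]
    have : hr.length - 1 - i = 0 := by omega
    rw [this]
    rfl
  | succ fuel ih =>
    intro i hN out j
    rw [discOuter]
    by_cases hi : i < hr.length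
    · rw [if_pos hi]
      obtain ⟨hstop, hconst⟩ := runEnd_props hr hr.length i (by omega)
      have hge := runEnd_ge hr hr.length i
      by_cases hr1 : runEnd hr hr.length i + 1 < hr.length
      · rw [if_pos hr1]
        set r := runEnd hr hr.length i with hrdef
        -- split the index range at the run end r
        have hsplit : List.range' i (hr.length - 1 - i)
            = List.range' i (r - i) ++ r :: List.range' (r + 1) (hr.length - 1 - (r + 1)) := by
          have h1 : hr.length - 1 - i = (r - i) + ((hr.length - 1 - (r + 1)) + 1) := by omega
          rw [h1, ← List.range'_append_1]
          congr 1
          have : i + (r - i) = r := by omega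
          rw [this, List.range'_succ]
        rw [hsplit, List.foldl_append,
          foldl_stepN_id hr values (List.range' i (r - i)) (out, j) (by
            intro k hk
            rw [List.mem_range'_1] at hk
            exact hconst k hk.1 (by omega)),
          List.foldl_cons]
        have hchg : hr.getD r 0 ≠ hr.getD (r + 1) 0 := by
          intro h; exact hstop ⟨hr1, h.symm⟩
        have hstep : stepN hr values (out, j) r
            = (PySem.List.pySetD out j (values.getD r 0), j + 1) := by
          unfold stepN; rw [if_pos hchg]
        rw [hstep]
        exact ih (r + 1) (by omega) _ _
      · rw [if_neg hr1]
        set r := runEnd hr hr.length i with hrdef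
        have hall : ∀ k ∈ List.range' i (hr.length - 1 - i), hr.getD (k + 1) 0 = hr.getD k 0 := by
          intro k hk
          rw [List.mem_range'_1] at hk
          exact hconst k hk.1 (by omega)
        rw [foldl_stepN_id hr values (List.range' i (hr.length - 1 - i)) (out, j) hall]
        have := ih (r + 1) (by omega) out j
        rw [this]
        have h0 : hr.length - 1 - (r + 1) = 0 := by omega
        rw [h0]
        rfl
    · rw [if_neg hi]
      have : hr.length - 1 - i = 0 := by omega
      rw [this]
      rfl

-- fold extensionality over the members of the index list
theorem foldl_congr_on {α β : Type} (f g : β → α → β) :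
    ∀ (L : List α) (st : β), (∀ st' k, k ∈ L → f st' k = g st' k) →
      L.foldl f st = L.foldl g st := by
  intro L
  induction L with
  | nil => intro st _; rfl
  | cons k L ih =>
    intro st h
    rw [List.foldl_cons, List.foldl_cons, h st k List.mem_cons_self]
    exact ih _ (fun st' x hx => h st' x (List.mem_cons_of_mem _ hx))

-- A's fold over pyRange equals the fold of stepN over List.range
theorem discresult_eq_foldN (numhours : Int) (hr values : List Int) :
    discresult numhours hr values
      = ((List.range (hr.length - 1)).foldl (stepN hr values)
          (List.replicate numhours.toNat 0, 0)).1 := by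
  unfold discresult
  rw [PySem.List.pyRange_one]
  have h0 : ((hr.length : Int) - 1 - 0).toNat = hr.length - 1 := by omega
  rw [h0, List.foldl_map]
  refine congrArg Prod.fst (foldl_congr_on _ _ _ _ ?_)
  intro st k hk
  rw [List.mem_range] at hk
  rw [show ((0 : Int) + (k : Int)) = (k : Int) from zero_add _]
  exact step_cast hr values st k hk

-- ===== VERDICT (by name: the statement is the Claim_ definition above) =====
theorem discresult_spec : Claim_equal_discresult := by
  intro numhours hr values _ _
  unfold Spec_discresult discresult_alt
  rw [discresult_eq_foldN, discOuter_eq_fold hr values (hr.length + 1) 0 (by omega),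
    List.range_eq_range']
  rfl
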